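-- pv_equiv track=rewrite | github.com/MattJenkins7/DND-Tools | Loot Table Generator.py | get_cantrips_known
-- ===== SOURCE A (Python) =====
-- def get_cantrips_known(class_name, level):
--     cantrip_progression = {
--         'Bard': {1: 2, 4: 3, 10: 4},
--         'Cleric': {1: 3, 4: 4, 10: 5},
--         'Druid': {1: 2, 4: 3, 10: 4},
--         'Sorcerer': {1: 4, 4: 5, 10: 6},
--         'Warlock': {1: 2, 4: 3, 10: 4},
--         'Wizard': {1: 3, 4: 4, 10: 5},
--         'Artificer': {1: 2, 6: 3, 14: 4},
--     }
--
--     if class_name not in cantrip_progression: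
--         return 0
--
--     progression = cantrip_progression[class_name]
--     cantrips = 0
--     for req_level in sorted(progression.keys(), reverse=True):
--         if level >= req_level:
--             cantrips = progression[req_level]
--             break
--
--     return cantrips
-- ===== SOURCE B (Python) =====
-- def get_cantrips_known(class_name, level):
--     base = {'Bard': 2, 'Cleric': 3, 'Druid': 2, 'Sorcerer': 4,
--             'Warlock': 2, 'Wizard': 3, 'Artificer': 2}
--     if class_name not in base or level < 1:
--         return 0
--     step1, step2 = (6, 14) if class_name == 'Artificer' else (4, 10)
--     return base[class_name] + (level >= step1) + (level >= step2)
-- ===== Notes on version B (the rewrite author's own statement) =====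
-- stated objective: alternative
-- what changed: Drops the dict-of-progressions and the reverse-sort/break search entirely: B stores only each class's base cantrip count and computes the result arithmetically as base plus two boolean step-up indicators at the class's two upgrade levels (4/10, or 6/14 for Artificer).
import Mathlib
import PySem

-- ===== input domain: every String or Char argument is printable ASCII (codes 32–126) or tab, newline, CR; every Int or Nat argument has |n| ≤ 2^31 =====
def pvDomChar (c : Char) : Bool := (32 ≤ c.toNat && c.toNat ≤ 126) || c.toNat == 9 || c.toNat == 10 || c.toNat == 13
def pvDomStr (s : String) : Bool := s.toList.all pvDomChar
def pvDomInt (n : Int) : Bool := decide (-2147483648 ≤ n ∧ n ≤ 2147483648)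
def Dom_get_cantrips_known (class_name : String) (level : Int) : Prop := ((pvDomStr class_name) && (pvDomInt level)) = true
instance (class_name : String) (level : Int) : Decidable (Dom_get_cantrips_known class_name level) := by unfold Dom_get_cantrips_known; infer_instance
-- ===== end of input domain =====

-- B replaces A's dict-of-progressions with reverse-sort-and-break by a per-class base
-- count plus two arithmetic step-up indicators (alternative decomposition; same value).

-- ===== PORT A =====
-- A's literal cantrip_progression table (dict of dicts, insertion order)
def pvProgA : PySem.Dict String (PySem.Dict Int Int) :=
  PySem.Dict.ofList
    [ ("Bard",      PySem.Dict.ofList [(1, 2), (4, 3), (10, 4)])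
    , ("Cleric",    PySem.Dict.ofList [(1, 3), (4, 4), (10, 5)])
    , ("Druid",     PySem.Dict.ofList [(1, 2), (4, 3), (10, 4)])
    , ("Sorcerer",  PySem.Dict.ofList [(1, 4), (4, 5), (10, 6)])
    , ("Warlock",   PySem.Dict.ofList [(1, 2), (4, 3), (10, 4)])
    , ("Wizard",    PySem.Dict.ofList [(1, 3), (4, 4), (10, 5)])
    , ("Artificer", PySem.Dict.ofList [(1, 2), (6, 3), (14, 4)])
    ]

-- the 'for req_level in sorted(...) : if level >= req_level: cantrips = progression[req_level]; break'
-- loop; cantrips stays 0 if no threshold qualifies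
def pvLoopA (prog : PySem.Dict Int Int) (level : Int) : List Int → Int
  | [] => 0
  | r :: rest => if level ≥ r then (prog.get? r).getD 0 else pvLoopA prog level rest

def get_cantrips_known (class_name : String) (level : Int) : Int :=
  match pvProgA.get? class_name with
  | none => 0
  | some progression =>
      pvLoopA progression level (PySem.List.sorted progression.keys (fun x => x) true)

-- ===== PORT B =====
-- B's base-count table
def pvBaseB : PySem.Dict String Int :=
  PySem.Dict.ofList
    [ ("Bard", 2), ("Cleric", 3), ("Druid", 2), ("Sorcerer", 4)
    , ("Warlock", 2), ("Wizard", 3), ("Artificer", 2) ]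

def get_cantrips_known_alt (class_name : String) (level : Int) : Int :=
  match pvBaseB.get? class_name with
  | none => 0
  | some base =>
      if level < 1 then 0
      else
        let steps : Int × Int := if class_name = "Artificer" then (6, 14) else (4, 10)
        base + (if level ≥ steps.1 then 1 else 0) + (if level ≥ steps.2 then 1 else 0)

-- ===== PRECONDITION & SPEC =====
def Spec_get_cantrips_known (class_name : String) (level : Int) (out : Int) : Prop := out = get_cantrips_known_alt class_name level
instance (class_name : String) (level : Int) (out : Int) : Decidable (Spec_get_cantrips_known class_name level out) := by unfold Spec_get_cantrips_known; infer_instance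

-- ===== CLAIM (what is proved, stated in full; the proofs are below) =====
def Claim_equal_get_cantrips_known : Prop := ∀ (class_name : String) (level : Int), Dom_get_cantrips_known class_name level → Spec_get_cantrips_known class_name level (get_cantrips_known class_name level)

-- ===== LEMMAS AND PROOFS =====

-- A's descending-search over a three-step progression {1: v, t2: v+1, t3: v+2}
-- equals B's base-plus-indicators arithmetic.
lemma loopA_arith (lvl v t2 t3 : Int) (h12 : 1 < t2) (h23 : t2 < t3) :
    pvLoopA (PySem.Dict.ofList [(1, v), (t2, v + 1), (t3, v + 2)]) lvl [t3, t2, 1] =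
      (if lvl < 1 then 0
       else v + (if lvl ≥ t2 then 1 else 0) + (if lvl ≥ t3 then 1 else 0)) := by
  have g1 : (PySem.Dict.ofList [((1:Int), v), (t2, v + 1), (t3, v + 2)]).get? 1 = some v := by
    simp [PySem.Dict.ofList, PySem.Dict.update, PySem.Dict.get?_insert,
      show (1:Int) ≠ t2 by omega, show (1:Int) ≠ t3 by omega]
  have g2 : (PySem.Dict.ofList [((1:Int), v), (t2, v + 1), (t3, v + 2)]).get? t2 = some (v + 1) := by
    simp [PySem.Dict.ofList, PySem.Dict.update, PySem.Dict.get?_insert,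
      show t2 ≠ t3 by omega]
  have g3 : (PySem.Dict.ofList [((1:Int), v), (t2, v + 1), (t3, v + 2)]).get? t3 = some (v + 2) := by
    simp [PySem.Dict.ofList, PySem.Dict.update]
  simp only [pvLoopA, g1, g2, g3, Option.getD_some, ge_iff_le]
  split_ifs <;> omega

-- ===== VERDICT (by name: the statement is the Claim_ definition above) =====
theorem get_cantrips_known_spec : Claim_equal_get_cantrips_known := by
  intro cn lvl _
  unfold Spec_get_cantrips_known
  by_cases hB : cn = "Bard"
  · subst hB
    show get_cantrips_known "Bard" lvl = get_cantrips_known_alt "Bard" lvl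
    simp only [get_cantrips_known, get_cantrips_known_alt,
      show pvProgA.get? "Bard" = some (PySem.Dict.ofList [(1, 2), (4, 2 + 1), (10, 2 + 2)]) from by decide,
      show pvBaseB.get? "Bard" = some 2 from by decide,
      show PySem.List.sorted (PySem.Dict.ofList [((1:Int), (2:Int)), (4, 2 + 1), (10, 2 + 2)]).keys (fun x => x) true = [10, 4, 1] from by decide,
      show ("Bard" = "Artificer") = False from by simp]
    exact loopA_arith lvl 2 4 10 (by norm_num) (by norm_num)
  · by_cases hC : cn = "Cleric"
    · subst hC
      simp only [get_cantrips_known, get_cantrips_known_alt,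
        show pvProgA.get? "Cleric" = some (PySem.Dict.ofList [(1, 3), (4, 3 + 1), (10, 3 + 2)]) from by decide,
        show pvBaseB.get? "Cleric" = some 3 from by decide,
        show PySem.List.sorted (PySem.Dict.ofList [((1:Int), (3:Int)), (4, 3 + 1), (10, 3 + 2)]).keys (fun x => x) true = [10, 4, 1] from by decide,
        show ("Cleric" = "Artificer") = False from by simp]
      exact loopA_arith lvl 3 4 10 (by norm_num) (by norm_num)
    · by_cases hD : cn = "Druid"
      · subst hD
        simp only [get_cantrips_known, get_cantrips_known_alt,
          show pvProgA.get? "Druid" = some (PySem.Dict.ofList [(1, 2), (4, 2 + 1), (10, 2 + 2)]) from by decide,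
          show pvBaseB.get? "Druid" = some 2 from by decide,
          show PySem.List.sorted (PySem.Dict.ofList [((1:Int), (2:Int)), (4, 2 + 1), (10, 2 + 2)]).keys (fun x => x) true = [10, 4, 1] from by decide,
          show ("Druid" = "Artificer") = False from by simp]
        exact loopA_arith lvl 2 4 10 (by norm_num) (by norm_num)
      · by_cases hS : cn = "Sorcerer"
        · subst hS
          simp only [get_cantrips_known, get_cantrips_known_alt,
            show pvProgA.get? "Sorcerer" = some (PySem.Dict.ofList [(1, 4), (4, 4 + 1), (10, 4 + 2)]) from by decide,
            show pvBaseB.get? "Sorcerer" = some 4 from by decide,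
            show PySem.List.sorted (PySem.Dict.ofList [((1:Int), (4:Int)), (4, 4 + 1), (10, 4 + 2)]).keys (fun x => x) true = [10, 4, 1] from by decide,
            show ("Sorcerer" = "Artificer") = False from by simp]
          exact loopA_arith lvl 4 4 10 (by norm_num) (by norm_num)
        · by_cases hW : cn = "Warlock"
          · subst hW
            simp only [get_cantrips_known, get_cantrips_known_alt,
              show pvProgA.get? "Warlock" = some (PySem.Dict.ofList [(1, 2), (4, 2 + 1), (10, 2 + 2)]) from by decide,
              show pvBaseB.get? "Warlock" = some 2 from by decide,
              show PySem.List.sorted (PySem.Dict.ofList [((1:Int), (2:Int)), (4, 2 + 1), (10, 2 + 2)]).keys (fun x => x) true = [10, 4, 1] from by decide,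
              show ("Warlock" = "Artificer") = False from by simp]
            exact loopA_arith lvl 2 4 10 (by norm_num) (by norm_num)
          · by_cases hZ : cn = "Wizard"
            · subst hZ
              simp only [get_cantrips_known, get_cantrips_known_alt,
                show pvProgA.get? "Wizard" = some (PySem.Dict.ofList [(1, 3), (4, 3 + 1), (10, 3 + 2)]) from by decide,
                show pvBaseB.get? "Wizard" = some 3 from by decide,
                show PySem.List.sorted (PySem.Dict.ofList [((1:Int), (3:Int)), (4, 3 + 1), (10, 3 + 2)]).keys (fun x => x) true = [10, 4, 1] from by decide,
                show ("Wizard" = "Artificer") = False from by simp]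
              exact loopA_arith lvl 3 4 10 (by norm_num) (by norm_num)
            · by_cases hA : cn = "Artificer"
              · subst hA
                simp only [get_cantrips_known, get_cantrips_known_alt,
                  show pvProgA.get? "Artificer" = some (PySem.Dict.ofList [(1, 2), (6, 2 + 1), (14, 2 + 2)]) from by decide,
                  show pvBaseB.get? "Artificer" = some 2 from by decide,
                  show PySem.List.sorted (PySem.Dict.ofList [((1:Int), (2:Int)), (6, 2 + 1), (14, 2 + 2)]).keys (fun x => x) true = [14, 6, 1] from by decide]
                exact loopA_arith lvl 2 6 14 (by norm_num) (by norm_num)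
              · have hnA : pvProgA.get? cn = none := by
                  simp [PySem.Dict.get?, show pvProgA.items = [("Bard", PySem.Dict.ofList [((1:Int), (2:Int)), (4, 3), (10, 4)]),
                     ("Cleric", PySem.Dict.ofList [(1, 3), (4, 4), (10, 5)]),
                     ("Druid", PySem.Dict.ofList [(1, 2), (4, 3), (10, 4)]),
                     ("Sorcerer", PySem.Dict.ofList [(1, 4), (4, 5), (10, 6)]),
                     ("Warlock", PySem.Dict.ofList [(1, 2), (4, 3), (10, 4)]),
                     ("Wizard", PySem.Dict.ofList [(1, 3), (4, 4), (10, 5)]),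
                     ("Artificer", PySem.Dict.ofList [(1, 2), (6, 3), (14, 4)])] from rfl,
                    List.find?, show ("Bard" == cn) = false from by simp [Ne.symm hB],
                    show ("Cleric" == cn) = false from by simp [Ne.symm hC],
                    show ("Druid" == cn) = false from by simp [Ne.symm hD],
                    show ("Sorcerer" == cn) = false from by simp [Ne.symm hS],
                    show ("Warlock" == cn) = false from by simp [Ne.symm hW],
                    show ("Wizard" == cn) = false from by simp [Ne.symm hZ],
                    show ("Artificer" == cn) = false from by simp [Ne.symm hA]]
                have hnB : pvBaseB.get? cn = none := by
                  simp [PySem.Dict.get?, show pvBaseB.items = [("Bard", (2:Int)), ("Cleric", 3), ("Druid", 2), ("Sorcerer", 4),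
                     ("Warlock", 2), ("Wizard", 3), ("Artificer", 2)] from rfl,
                    List.find?, show ("Bard" == cn) = false from by simp [Ne.symm hB],
                    show ("Cleric" == cn) = false from by simp [Ne.symm hC],
                    show ("Druid" == cn) = false from by simp [Ne.symm hD],
                    show ("Sorcerer" == cn) = false from by simp [Ne.symm hS],
                    show ("Warlock" == cn) = false from by simp [Ne.symm hW],
                    show ("Wizard" == cn) = false from by simp [Ne.symm hZ],
                    show ("Artificer" == cn) = false from by simp [Ne.symm hA]]
                simp only [get_cantrips_known, get_cantrips_known_alt, hnA, hnB]
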